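-- pv_equiv track=rewrite | github.com/FaultMaven/FaultMaven-Mono | faultmaven/services/agentic/phase_handlers/document_handler.py | _detect_artifact_acceptance
-- ===== SOURCE A (Python) =====
-- def _detect_artifact_acceptance(user_query: str) -> bool:
--     """Detect if user wants artifacts
--
--     Args:
--         user_query: User query
--
--     Returns:
--         True if user wants artifacts
--     """
--     query_lower = user_query.lower()
--
--     acceptance_signals = [
--         "yes", "sure", "please", "ok", "okay", "yeah",
--         "go ahead", "sounds good", "that would be great",
--         "i'd like", "would love", "generate", "create"
--     ]
--
--     rejection_signals = [
--         "no", "not now", "skip", "no thanks", "not needed",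
--         "don't need", "later", "maybe later", "pass"
--     ]
--
--     # Check rejection first (higher priority)
--     for signal in rejection_signals:
--         if signal in query_lower:
--             return False
--
--     # Check acceptance
--     for signal in acceptance_signals:
--         if signal in query_lower:
--             return True
--
--     # Default to acceptance if ambiguous (artifacts are helpful)
--     return True
-- ===== SOURCE B (Python) =====
-- def _detect_artifact_acceptance(user_query: str) -> bool:
--     """Detect if user wants artifacts.
--
--     Position-based scan: walk the lowered query once; at each index test
--     whether any rejection keyword starts there (str.startswith with a tuple).
--     Any hit means False; reaching the end means True (the original's
--     acceptance scan is dead code since its fall-through already returns True).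
--     """
--     rejection_signals = ("no", "not now", "skip", "no thanks", "not needed",
--                          "don't need", "later", "maybe later", "pass")
--     q = user_query.lower()
--     for i in range(len(q)):
--         if q.startswith(rejection_signals, i):
--             return False
--     return True
-- ===== Notes on version B (the rewrite author's own statement) =====
-- stated objective: alternative
-- what changed: B replaces A's two per-signal substring loops (one of which is dead code) by a single position-based scan of the lowered query that tests a multi-pattern prefix match (startswith with a tuple) at each index.
import Mathlib
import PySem

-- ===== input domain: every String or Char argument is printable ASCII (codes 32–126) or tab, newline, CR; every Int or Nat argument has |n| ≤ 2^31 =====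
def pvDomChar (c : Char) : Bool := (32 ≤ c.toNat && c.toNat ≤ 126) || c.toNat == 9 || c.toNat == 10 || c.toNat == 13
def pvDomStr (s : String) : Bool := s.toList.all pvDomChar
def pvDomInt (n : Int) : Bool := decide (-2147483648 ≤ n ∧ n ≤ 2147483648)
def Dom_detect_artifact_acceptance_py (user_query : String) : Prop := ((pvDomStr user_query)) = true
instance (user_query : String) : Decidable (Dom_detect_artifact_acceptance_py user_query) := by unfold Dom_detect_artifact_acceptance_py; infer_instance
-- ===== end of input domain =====

-- B replaces A's two per-signal substring loops (one dead) by one position-based scan of the lowered query with a multi-pattern prefix check at each index; equal return value everywhere.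

-- ===== PORT A =====
def pvAcceptanceSignals : List String :=
  ["yes", "sure", "please", "ok", "okay", "yeah",
   "go ahead", "sounds good", "that would be great",
   "i'd like", "would love", "generate", "create"]

def pvRejectionSignals : List String :=
  ["no", "not now", "skip", "no thanks", "not needed",
   "don't need", "later", "maybe later", "pass"]

-- second loop of A: return True on a match, fall through to `return True`
def pvLoopAcc : List String → String → Bool
  | [], _ => true
  | s :: rest, q => if PySem.Str.isIn s q then true else pvLoopAcc rest q

-- first loop of A: return False on a match, else run the acceptance loop
def pvLoopRej : List String → String → Bool
  | [], q => pvLoopAcc pvAcceptanceSignals q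
  | s :: rest, q => if PySem.Str.isIn s q then false else pvLoopRej rest q

def detect_artifact_acceptance_py (user_query : String) : Bool :=
  pvLoopRej pvRejectionSignals (PySem.Str.lower user_query)

-- ===== PORT B =====
-- Source B's `for i in range(len(q)): if q.startswith(rejection_signals, i): return False`
-- as structural recursion on the suffix of the lowered query's char list
def pvScan : List Char → Bool
  | [] => true
  | c :: rest =>
    if pvRejectionSignals.any (fun sig => sig.toList.isPrefixOf (c :: rest)) then false
    else pvScan rest

def detect_artifact_acceptance_py_alt (user_query : String) : Bool :=
  pvScan (PySem.Str.lower user_query).toList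

-- ===== PRECONDITION & SPEC =====
def Spec_detect_artifact_acceptance_py (user_query : String) (out : Bool) : Prop := out = detect_artifact_acceptance_py_alt user_query
instance (user_query : String) (out : Bool) : Decidable (Spec_detect_artifact_acceptance_py user_query out) := by unfold Spec_detect_artifact_acceptance_py; infer_instance

-- ===== CLAIM =====
def Claim_equal_detect_artifact_acceptance_py : Prop := ∀ (user_query : String), Dom_detect_artifact_acceptance_py user_query → Spec_detect_artifact_acceptance_py user_query (detect_artifact_acceptance_py user_query)

-- ===== LEMMAS AND PROOFS =====

-- A's acceptance loop always returns true (match → true, fall-through → true)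
theorem pvLoopAcc_eq_true (sigs : List String) (q : String) : pvLoopAcc sigs q = true := by
  induction sigs with
  | nil => rfl
  | cons s rest ih => simp [pvLoopAcc, ih]

theorem pvLoopRej_eq (sigs : List String) (q : String) :
    pvLoopRej sigs q = !(sigs.any (fun sig => PySem.Str.isIn sig q)) := by
  induction sigs with
  | nil => simp [pvLoopRej, pvLoopAcc_eq_true]
  | cons s rest ih =>
    by_cases h : PySem.Str.isIn s q = true <;> simp [pvLoopRej, h, ih]

-- B's position scan returns false exactly when some rejection keyword is an infix
theorem pvScan_eq (cs : List Char) :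
    pvScan cs = !(pvRejectionSignals.any (fun sig => decide (sig.toList <:+: cs))) := by
  induction cs with
  | nil => decide
  | cons c rest ih =>
    by_cases h : (pvRejectionSignals.any (fun sig => sig.toList.isPrefixOf (c :: rest))) = true
    · rw [pvScan, if_pos h]
      symm
      simp only [List.any_eq_true, List.isPrefixOf_iff_prefix] at h
      obtain ⟨sig, hmem, hpre⟩ := h
      simp only [Bool.not_eq_false', List.any_eq_true]
      exact ⟨sig, hmem, decide_eq_true hpre.isInfix⟩
    · rw [pvScan, if_neg h, ih]
      congr 1
      simp only [List.any_eq_true, List.isPrefixOf_iff_prefix, not_exists, not_and] at h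
      apply Bool.eq_iff_iff.mpr
      simp only [List.any_eq_true, decide_eq_true_eq]
      constructor
      · rintro ⟨sig, hmem, hinf⟩
        exact ⟨sig, hmem, List.infix_cons_iff.mpr (Or.inr hinf)⟩
      · rintro ⟨sig, hmem, hinf⟩
        rcases List.infix_cons_iff.mp hinf with hp | hs
        · exact absurd hp (h sig hmem)
        · exact ⟨sig, hmem, hs⟩

-- ===== VERDICT =====
theorem detect_artifact_acceptance_py_spec : Claim_equal_detect_artifact_acceptance_py := by
  intro q _
  unfold Spec_detect_artifact_acceptance_py detect_artifact_acceptance_py detect_artifact_acceptance_py_alt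
  rw [pvLoopRej_eq, pvScan_eq]
  congr 2
  funext sig
  by_cases hc : sig.toList <:+: PySem.Chars.lower q.toList <;>
    simp [PySem.Chars.isIn_iff_infix, PySem.Chars.isIn_eq_false_iff, hc]
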